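-- pv_equiv track=rewrite | github.com/inform-mai/LR5 | test_6.py | count_prime_numbers
-- ===== SOURCE A (Python) =====
-- def count_prime_numbers(my_list):
--     cnt_prime = 0
--     for i in my_list:
--         cnt_del = 0
--         for j in range(2, i // 2 + 1):
--             if abs(i) % j == 0:
--                 cnt_del += 1
--         if cnt_del == 0:
--             cnt_prime += 1
--     return cnt_prime
-- ===== SOURCE B (Python) =====
-- def count_prime_numbers(my_list):
--     def _counted(i):
--         # same acceptance set as A: every i < 4 (range empty there), and i >= 4 with
--         # no divisor -- tested only up to sqrt(i) instead of i//2
--         if i < 4: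
--             return True
--         d = 2
--         while d * d <= i:
--             if i % d == 0:
--                 return False
--             d += 1
--         return True
--     return sum(1 for i in my_list if _counted(i))
-- ===== Notes on version B (the rewrite author's own statement) =====
-- stated objective: faster
-- what changed: Replaces A's trial division over the whole range [2, i//2] (counting all divisors) with an early-exit trial division only up to sqrt(i), keeping A's acceptance of every i < 4 (negatives, 0, 1, 2, 3) where A's range is empty.
import Mathlib
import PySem

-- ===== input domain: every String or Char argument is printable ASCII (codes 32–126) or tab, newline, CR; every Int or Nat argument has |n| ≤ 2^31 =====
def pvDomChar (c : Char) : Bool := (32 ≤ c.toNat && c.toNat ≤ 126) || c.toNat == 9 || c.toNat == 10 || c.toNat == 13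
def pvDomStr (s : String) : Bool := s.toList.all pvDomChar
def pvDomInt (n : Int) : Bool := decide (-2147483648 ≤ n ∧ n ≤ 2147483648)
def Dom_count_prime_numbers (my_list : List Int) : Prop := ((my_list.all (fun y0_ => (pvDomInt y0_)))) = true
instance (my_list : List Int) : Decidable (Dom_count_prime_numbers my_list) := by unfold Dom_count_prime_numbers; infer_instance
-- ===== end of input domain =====

-- B replaces A's divisor count over the whole range [2, i//2] by an early-exit
-- trial division up to sqrt(i) (faster: asymptotic, O(sqrt(i)) vs O(i) per element).


-- ===== PORT A =====
def count_prime_numbers (my_list : List Int) : Int :=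
  my_list.foldl (fun cnt_prime i =>
    let cnt_del : Int :=
      (PySem.List.pyRange 2 (PySem.Int.floordiv i 2 + 1) 1).foldl
        (fun cnt_del j => if PySem.Int.mod |i| j = 0 then cnt_del + 1 else cnt_del) 0
    if cnt_del = 0 then cnt_prime + 1 else cnt_prime) 0

-- ===== PORT B =====
-- the 'while d * d <= i' loop of Source B's _counted (early exit on a divisor)
def pvTrial (i : Int) (d : Int) : Bool :=
  if _h : d * d ≤ i then
    if PySem.Int.mod i d = 0 then false else pvTrial i (d + 1)
  else true
termination_by (i + 2 - d).toNat
decreasing_by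
  have : d ≤ i + 1 := by nlinarith [sq_nonneg (d - 1), mul_self_nonneg d]
  omega

def pvCounted (i : Int) : Bool :=
  if i < 4 then true else pvTrial i 2

def count_prime_numbers_alt (my_list : List Int) : Int :=
  (my_list.countP pvCounted : Int)

-- ===== PRECONDITION & SPEC =====
def Spec_count_prime_numbers (my_list : List Int) (out : Int) : Prop := out = count_prime_numbers_alt my_list
instance (my_list : List Int) (out : Int) : Decidable (Spec_count_prime_numbers my_list out) := by unfold Spec_count_prime_numbers; infer_instance

-- ===== CLAIM (what is proved, stated in full; the proofs are below) =====
def Claim_equal_count_prime_numbers : Prop := ∀ (my_list : List Int), Dom_count_prime_numbers my_list → Spec_count_prime_numbers my_list (count_prime_numbers my_list)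

-- ===== LEMMAS AND PROOFS =====

-- pvTrial i d = true  ↔  no divisor e of i with d ≤ e and e*e ≤ i  (for 0 ≤ d)
lemma pvTrial_iff : ∀ (i d : Int), 0 ≤ d → (pvTrial i d = true ↔ ∀ e, d ≤ e → e * e ≤ i → ¬ e ∣ i) := by
  intro i d
  induction d using pvTrial.induct (i := i) with
  | case1 d h hm =>
      intro _
      rw [pvTrial]
      simp only [dif_pos h, if_pos hm, Bool.false_eq_true, false_iff]
      push Not
      exact ⟨d, le_refl d, h, (PySem.Int.mod_eq_zero_iff_dvd i d).mp hm⟩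
  | case2 d h hm ih =>
      intro hd
      rw [pvTrial]
      simp only [dif_pos h, if_neg hm]
      rw [ih (by omega)]
      constructor
      · intro H e hde hei
        rcases eq_or_lt_of_le hde with rfl | hlt
        · intro hdvd
          exact hm ((PySem.Int.mod_eq_zero_iff_dvd i d).mpr hdvd)
        · exact H e (by omega) hei
      · intro H e h1 h2
        exact H e (by omega) h2
  | case3 d h =>
      intro hd
      rw [pvTrial]
      simp only [dif_neg h, true_iff]
      intro e hde hei hdvd
      exact h (by nlinarith)

-- A's per-element test equals B's
lemma counted_eq (i : Int) :
    ((PySem.List.pyRange 2 (PySem.Int.floordiv i 2 + 1) 1).countP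
      (fun j => PySem.Int.mod |i| j = 0) = 0) ↔ pvCounted i = true := by
  unfold pvCounted
  by_cases h4 : i < 4
  · have hr : PySem.List.pyRange 2 (PySem.Int.floordiv i 2 + 1) 1 = [] := by
      apply PySem.List.pyRange_one_eq_nil
      have : PySem.Int.floordiv i 2 < 2 := (PySem.Int.floordiv_lt_iff_lt_mul (by omega)).mpr (by omega)
      omega
    rw [hr]
    simp [h4]
  · push Not at h4
    have hi : |i| = i := abs_of_nonneg (by omega)
    rw [if_neg (by omega), pvTrial_iff i 2 (by omega), List.countP_eq_zero]
    constructor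
    · intro H e h2 hsq hdvd
      have hmem : e ∈ PySem.List.pyRange 2 (PySem.Int.floordiv i 2 + 1) 1 := by
        rw [PySem.List.mem_pyRange_one]
        have : e ≤ PySem.Int.floordiv i 2 :=
          (PySem.Int.le_floordiv_iff_mul_le (by omega)).mpr (by nlinarith)
        omega
      have := H e hmem
      simp only [hi, decide_eq_true_eq] at this
      exact this ((PySem.Int.mod_eq_zero_iff_dvd i e).mpr hdvd)
    · intro H j hmem
      rw [PySem.List.mem_pyRange_one] at hmem
      obtain ⟨h2, hub⟩ := hmem
      simp only [hi, decide_eq_true_eq]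
      intro hm0
      have hdvd : j ∣ i := (PySem.Int.mod_eq_zero_iff_dvd i j).mp hm0
      have hj2 : j * 2 ≤ i :=
        (PySem.Int.le_floordiv_iff_mul_le (a := i) (b := 2) (by omega)).mp (by omega)
      obtain ⟨k, hk⟩ := hdvd
      have hk2 : 2 ≤ k := by nlinarith
      by_cases hjj : j * j ≤ i
      · exact H j h2 hjj ⟨k, hk⟩
      · push Not at hjj
        have hkj : k < j := by nlinarith
        exact H k hk2 (by nlinarith) ⟨j, by rw [hk]; ring⟩

-- ===== VERDICT (by name: the statement is the Claim_ definition above) =====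
theorem count_prime_numbers_spec : Claim_equal_count_prime_numbers := by
  intro my_list _
  unfold Spec_count_prime_numbers count_prime_numbers count_prime_numbers_alt
  have hstep : (fun (cnt_prime : Int) (i : Int) =>
      let cnt_del : Int := (PySem.List.pyRange 2 (PySem.Int.floordiv i 2 + 1) 1).foldl
          (fun cnt_del j => if PySem.Int.mod |i| j = 0 then cnt_del + 1 else cnt_del) 0
      if cnt_del = 0 then cnt_prime + 1 else cnt_prime)
      = fun c i => if pvCounted i then c + 1 else c := by
    funext c i
    show (if ((PySem.List.pyRange 2 (PySem.Int.floordiv i 2 + 1) 1).foldl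
          (fun cnt_del j => if PySem.Int.mod |i| j = 0 then cnt_del + 1 else cnt_del) 0) = 0
        then c + 1 else c) = _
    rw [PySem.List.foldl_ite_add_one, zero_add]
    by_cases hc : pvCounted i = true
    · rw [if_pos (by exact_mod_cast (counted_eq i).mpr hc), if_pos hc]
    · rw [if_neg (fun h0 => hc ((counted_eq i).mp (by exact_mod_cast h0))), if_neg hc]
  rw [hstep, PySem.List.foldl_ite_add_one (p := fun i => pvCounted i = true), zero_add]
  simp
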